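-- pv_equiv track=rewrite | github.com/DorianKid/blackjack-trainer | BlackjackS17.py | dealer_play_sim
-- ===== SOURCE A (Python) =====
-- def hit(mazo, lista):
--     """Toma una carta del mazo y la agrega a la lista"""
--     if mazo:
--         carta = mazo.pop()
--         lista.append(carta)
--     return carta
--
-- def _valor(carta: str) -> str:
--     return carta.split()[0]
--
-- def contar_mano_detallado(mano, mazo_valores):
--     # Total con As como 1 (duro); marca si puede ser soft (+10)
--     total_sin_ases = sum(mazo_valores[c] for c in mano if _valor(c) != "A")
--     ases = sum(1 for c in mano if _valor(c) == "A")
--     total_duro = total_sin_ases + ases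
--     is_soft = ases > 0 and (total_duro + 10) <= 21
--     total = total_duro + 10 if is_soft else total_duro
--     return total, ases, is_soft
--
-- def dealer_play_sim(mazo_local, mano_dealer, mazo_valores, hit_soft_17=False):
--     # Simula el turno del dealer (H17 opcional)
--     while True:
--         total, ases, is_soft = contar_mano_detallado(mano_dealer, mazo_valores)
--         if total < 17 or (hit_soft_17 and total == 17 and is_soft):
--             hit(mazo_local, mano_dealer)
--         else:
--             break
--     return mano_dealer
-- ===== SOURCE B (Python) =====
-- # B: one forward count of the hand, then a single scan over the (reversed) deck that only
-- # maintains a running hard total / ace count to find how many cards k the dealer draws,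
-- # followed by one splice: no hit() calls and no per-iteration recount of the whole hand.
-- # Note: mutates mano_dealer/mazo_local like A does (same final list states where A returns);
-- # on deck exhaustion A raises UnboundLocalError while B returns the fully drawn hand.
-- def dealer_play_sim(mazo_local, mano_dealer, mazo_valores, hit_soft_17=False):
--     hard = 0
--     aces = 0
--     for c in mano_dealer:
--         if c.split()[0] == "A":
--             hard += 1
--             aces += 1
--         else:
--             hard += mazo_valores[c]
--     n = len(mazo_local)
--     k = 0
--     while True:
--         soft = aces > 0 and hard + 10 <= 21
--         total = hard + 10 if soft else hard
--         if not (total < 17 or (hit_soft_17 and total == 17 and soft)):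
--             break
--         if k == n:
--             break  # deck exhausted: A raises UnboundLocalError here (outside Pre_)
--         c = mazo_local[n - 1 - k]
--         k += 1
--         if c.split()[0] == "A":
--             hard += 1
--             aces += 1
--         else:
--             hard += mazo_valores[c]
--     drawn = mazo_local[n - k:]
--     del mazo_local[n - k:]
--     mano_dealer.extend(reversed(drawn))
--     return mano_dealer
-- ===== Notes on version B (the rewrite author's own statement) =====
-- stated objective: alternative
-- what changed: Instead of re-counting the whole growing hand with contar_mano_detallado on every loop iteration and popping cards one at a time through hit(), B counts the hand once, then scans the reversed deck while maintaining only a running hard total and ace count to determine the number k of cards drawn, and finally extends/truncates the two lists in one splice.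
import Mathlib
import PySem

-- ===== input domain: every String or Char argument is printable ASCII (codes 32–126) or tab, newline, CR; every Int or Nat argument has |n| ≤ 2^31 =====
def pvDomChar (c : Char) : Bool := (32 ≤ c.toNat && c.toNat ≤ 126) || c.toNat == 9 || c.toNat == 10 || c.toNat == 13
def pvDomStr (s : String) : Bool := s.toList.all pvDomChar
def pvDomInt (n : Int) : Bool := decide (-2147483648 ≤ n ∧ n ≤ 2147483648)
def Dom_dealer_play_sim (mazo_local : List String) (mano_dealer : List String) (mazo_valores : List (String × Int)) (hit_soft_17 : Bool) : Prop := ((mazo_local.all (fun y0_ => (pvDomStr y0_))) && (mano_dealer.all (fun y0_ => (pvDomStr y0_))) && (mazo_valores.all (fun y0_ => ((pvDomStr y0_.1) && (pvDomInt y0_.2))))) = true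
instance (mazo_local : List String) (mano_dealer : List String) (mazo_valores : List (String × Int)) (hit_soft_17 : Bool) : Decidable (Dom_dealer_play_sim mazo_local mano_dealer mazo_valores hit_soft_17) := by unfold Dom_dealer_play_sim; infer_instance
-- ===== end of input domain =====

-- B replaces A's per-iteration full-hand recount and one-card hit() loop by one hand count plus a
-- single scan of the reversed deck maintaining a running hard total / ace count, then one splice.


-- ===== PORT A =====
-- _valor(carta), total form: Python raises IndexError when carta has no words (excluded by Pre_)
def pvValor (carta : String) : String := (PySem.Str.split₀ carta).headD ""

-- mazo_valores[c], total form: Python raises KeyError when c is absent (excluded by Pre_)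
def pvLookup (vals : List (String × Int)) (c : String) : Int := PySem.Dict.getD (PySem.Dict.mk vals) c 0

def contar_mano_detallado (mano : List String) (vals : List (String × Int)) : Int × Int × Bool :=
  let total_sin_ases := ((mano.filter (fun c => pvValor c ≠ "A")).map (fun c => pvLookup vals c)).sum
  let ases : Int := ((mano.filter (fun c => pvValor c = "A")).length : Int)
  let total_duro := total_sin_ases + ases
  let is_soft := decide (ases > 0) && decide (total_duro + 10 ≤ 21)
  let total := if is_soft then total_duro + 10 else total_duro
  (total, ases, is_soft)

-- the while-True loop; hit() pops the last deck card and appends it to the hand.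
-- On an empty deck Python's hit raises UnboundLocalError: excluded by Pre_ (we return the hand there).
def dealer_play_sim (mazo_local : List String) (mano_dealer : List String) (mazo_valores : List (String × Int)) (hit_soft_17 : Bool) : List String :=
  let r := contar_mano_detallado mano_dealer mazo_valores
  if r.1 < 17 ∨ (hit_soft_17 = true ∧ r.1 = 17 ∧ r.2.2 = true) then
    match h : mazo_local.getLast? with
    | none => mano_dealer
    | some carta => dealer_play_sim mazo_local.dropLast (mano_dealer ++ [carta]) mazo_valores hit_soft_17
  else mano_dealer
termination_by mazo_local.length
decreasing_by
  have hne : mazo_local ≠ [] := by intro e; subst e; simp at h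
  simpa [List.length_dropLast] using Nat.sub_lt (List.length_pos_iff.mpr hne) one_pos

-- ===== PORT B =====
-- fold step of Source B's running (hard, aces) update for one card
def pvStep (vals : List (String × Int)) (p : Int × Int) (c : String) : Int × Int :=
  if (PySem.Str.split₀ c).headD "" = "A" then (p.1 + 1, p.2 + 1)
  else (p.1 + PySem.Dict.getD (PySem.Dict.mk vals) c 0, p.2)

-- Source B's while loop: scan the reversed deck, returning the number k of cards drawn
def pvScan (revDeck : List String) (vals : List (String × Int)) (h17 : Bool) (hard aces : Int) : Nat :=
  let soft := decide (aces > 0) && decide (hard + 10 ≤ 21)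
  let total := if soft then hard + 10 else hard
  if total < 17 ∨ (h17 = true ∧ total = 17 ∧ soft = true) then
    match revDeck with
    | [] => 0   -- deck exhausted (Python A raises here; outside Pre_)
    | c :: rest =>
      let p := pvStep vals (hard, aces) c
      pvScan rest vals h17 p.1 p.2 + 1
  else 0

def dealer_play_sim_alt (mazo_local : List String) (mano_dealer : List String) (mazo_valores : List (String × Int)) (hit_soft_17 : Bool) : List String :=
  let p := mano_dealer.foldl (pvStep mazo_valores) (0, 0)
  let k := pvScan mazo_local.reverse mazo_valores hit_soft_17 p.1 p.2
  mano_dealer ++ mazo_local.reverse.take k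

-- ===== PRECONDITION & SPEC =====
-- Independent (port-free) helpers for Pre_:
-- a card Python can process without raising: it has a first word, and is an ace (never
-- looked up) or present in the value dict
def pvOkCard (vals : List (String × Int)) (c : String) : Bool :=
  !(PySem.Str.split₀ c).isEmpty &&
    ((PySem.Str.split₀ c).headD "" == "A" || PySem.Dict.contains (PySem.Dict.mk vals) c)

-- the hand cs makes the dealer stand (the draw condition is false)
def pvStands (vals : List (String × Int)) (h17 : Bool) (cs : List String) : Bool :=
  let duro : Int :=
    ((cs.filter (fun c => (PySem.Str.split₀ c).headD "" ≠ "A")).map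
        (fun c => PySem.Dict.getD (PySem.Dict.mk vals) c 0)).sum +
      ((cs.filter (fun c => (PySem.Str.split₀ c).headD "" = "A")).length : Int)
  let soft := decide (((cs.filter (fun c => (PySem.Str.split₀ c).headD "" = "A")).length : Int) > 0) &&
      decide (duro + 10 ≤ 21)
  let total := if soft then duro + 10 else duro
  !(decide (total < 17) || (h17 && decide (total = 17) && soft))

-- Pre_ is EXACT: Python A returns normally iff some prefix of the drawn cards (the deck read
-- back-to-front) consists, together with the hand, of processable cards and makes the dealer
-- stand; otherwise A raises (IndexError/KeyError on a bad card, UnboundLocalError on exhaustion).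
def Pre_dealer_play_sim (mazo_local : List String) (mano_dealer : List String) (mazo_valores : List (String × Int)) (hit_soft_17 : Bool) : Prop :=
  ((List.range (mazo_local.length + 1)).any (fun k =>
      (mano_dealer ++ mazo_local.reverse.take k).all (pvOkCard mazo_valores) &&
        pvStands mazo_valores hit_soft_17 (mano_dealer ++ mazo_local.reverse.take k))) = true
instance (mazo_local : List String) (mano_dealer : List String) (mazo_valores : List (String × Int)) (hit_soft_17 : Bool) : Decidable (Pre_dealer_play_sim mazo_local mano_dealer mazo_valores hit_soft_17) := by unfold Pre_dealer_play_sim; infer_instance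

def pvWitness_dealer_play_sim : List String × List String × (List (String × Int)) × Bool :=
  (["5 s"], ["K s", "Q s"], [("K s", 10), ("Q s", 10), ("5 s", 5)], false)

def Spec_dealer_play_sim (mazo_local : List String) (mano_dealer : List String) (mazo_valores : List (String × Int)) (hit_soft_17 : Bool) (out : List String) : Prop := out = dealer_play_sim_alt mazo_local mano_dealer mazo_valores hit_soft_17
instance (mazo_local : List String) (mano_dealer : List String) (mazo_valores : List (String × Int)) (hit_soft_17 : Bool) (out : List String) : Decidable (Spec_dealer_play_sim mazo_local mano_dealer mazo_valores hit_soft_17 out) := by unfold Spec_dealer_play_sim; infer_instance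

-- ===== CLAIM (what is proved, stated in full; the proofs are below) =====
def Claim_equal_dealer_play_sim : Prop := ∀ (mazo_local : List String) (mano_dealer : List String) (mazo_valores : List (String × Int)) (hit_soft_17 : Bool), Dom_dealer_play_sim mazo_local mano_dealer mazo_valores hit_soft_17 → Pre_dealer_play_sim mazo_local mano_dealer mazo_valores hit_soft_17 → Spec_dealer_play_sim mazo_local mano_dealer mazo_valores hit_soft_17 (dealer_play_sim mazo_local mano_dealer mazo_valores hit_soft_17)


-- ===== LEMMAS AND PROOFS =====
-- the hard total and ace count of A's hand count, named for the proofs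
def pvDuro (mano : List String) (vals : List (String × Int)) : Int :=
  ((mano.filter (fun c => pvValor c ≠ "A")).map (fun c => pvLookup vals c)).sum +
    ((mano.filter (fun c => pvValor c = "A")).length : Int)
def pvAses (mano : List String) (vals : List (String × Int)) : Int :=
  ((mano.filter (fun c => pvValor c = "A")).length : Int)

lemma foldl_pvStep_spec (vals : List (String × Int)) (mano : List String) :
    ∀ p : Int × Int, mano.foldl (pvStep vals) p = (p.1 + pvDuro mano vals, p.2 + pvAses mano vals) := by
  induction mano with
  | nil => intro p; simp [pvDuro, pvAses]
  | cons c m ih =>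
    intro p
    by_cases h : (PySem.Str.split₀ c).headD "" = "A" <;>
      simp only [List.foldl_cons, ih, pvStep, pvDuro, pvAses, pvValor, pvLookup, List.filter_cons,
        h, if_pos, if_neg, ne_eq, not_true_eq_false, not_false_eq_true, decide_true, decide_false,
        List.length_cons, List.map_cons, List.sum_cons] <;>
      refine Prod.ext ?_ ?_ <;> push_cast <;> ring

lemma contar_eq (mano : List String) (vals : List (String × Int)) :
    contar_mano_detallado mano vals =
      ((if decide (pvAses mano vals > 0) && decide (pvDuro mano vals + 10 ≤ 21)
          then pvDuro mano vals + 10 else pvDuro mano vals),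
        pvAses mano vals,
        decide (pvAses mano vals > 0) && decide (pvDuro mano vals + 10 ≤ 21)) := by
  simp [contar_mano_detallado, pvDuro, pvAses]

lemma core (vals : List (String × Int)) (h17 : Bool) :
    ∀ (L mano : List String),
      dealer_play_sim L.reverse mano vals h17 =
        mano ++ L.take (pvScan L vals h17 (pvDuro mano vals) (pvAses mano vals)) := by
  intro L
  induction L with
  | nil =>
    intro mano
    rw [dealer_play_sim]
    simp [pvScan]
  | cons c rest ih =>
    intro mano
    have hrev : (c :: rest).reverse = rest.reverse ++ [c] := by simp
    rw [hrev, dealer_play_sim, contar_eq]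
    rw [pvScan]
    by_cases hcond :
        (if decide (pvAses mano vals > 0) && decide (pvDuro mano vals + 10 ≤ 21)
          then pvDuro mano vals + 10 else pvDuro mano vals) < 17 ∨
        (h17 = true ∧
          (if decide (pvAses mano vals > 0) && decide (pvDuro mano vals + 10 ≤ 21)
            then pvDuro mano vals + 10 else pvDuro mano vals) = 17 ∧
          (decide (pvAses mano vals > 0) && decide (pvDuro mano vals + 10 ≤ 21)) = true)
    · rw [if_pos hcond, if_pos hcond]
      have hstep : pvStep vals (pvDuro mano vals, pvAses mano vals) c =
          (pvDuro (mano ++ [c]) vals, pvAses (mano ++ [c]) vals) := by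
        have hfold := foldl_pvStep_spec vals (mano ++ [c]) (0, 0)
        rw [List.foldl_append] at hfold
        rw [foldl_pvStep_spec vals mano (0, 0)] at hfold
        simpa using hfold
      split
      · next heq => simp at heq
      · next carta heq =>
        have hc : carta = c := by
          rw [List.getLast?_concat] at heq
          exact (Option.some.injEq _ _ ▸ heq).symm
        subst hc
        have hdrop : (rest.reverse ++ [carta]).dropLast = rest.reverse := by simp
        rw [hdrop, ih (mano ++ [carta])]
        have hz : (have p := pvStep vals (pvDuro mano vals, pvAses mano vals) carta;
            pvScan rest vals h17 p.1 p.2 + 1) =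
            pvScan rest vals h17 (pvDuro (mano ++ [carta]) vals) (pvAses (mano ++ [carta]) vals) + 1 := by
          rw [show (pvStep vals (pvDuro mano vals, pvAses mano vals) carta) =
            (pvDuro (mano ++ [carta]) vals, pvAses (mano ++ [carta]) vals) from hstep]
        rw [hz]
        simp [List.take_succ_cons, List.append_assoc]
    · rw [if_neg hcond, if_neg hcond]
      simp

lemma ports_agree (mazo_local mano_dealer : List String) (mazo_valores : List (String × Int)) (hit_soft_17 : Bool) :
    dealer_play_sim mazo_local mano_dealer mazo_valores hit_soft_17 =
      dealer_play_sim_alt mazo_local mano_dealer mazo_valores hit_soft_17 := by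
  have h := core mazo_valores hit_soft_17 mazo_local.reverse mano_dealer
  rw [List.reverse_reverse] at h
  rw [h]
  simp only [dealer_play_sim_alt, foldl_pvStep_spec mazo_valores mano_dealer (0, 0)]
  norm_num

-- ===== VERDICT (by name: the statement is the Claim_ definition above) =====
theorem dealer_play_sim_spec : Claim_equal_dealer_play_sim := by
  intro mazo_local mano_dealer mazo_valores hit_soft_17 _ _
  unfold Spec_dealer_play_sim
  exact ports_agree mazo_local mano_dealer mazo_valores hit_soft_17
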